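-- pv_equiv track=rewrite | github.com/huangdecai/suanfa | BaiJiaLe/main.py | DeleteCard
-- ===== SOURCE A (Python) =====
-- def DeleteCard(src, sub):
--     tmpstr = src
--     for i in range(0, len(sub)):
--         for j in range(0, len(src)):
--             if sub[i] == src[j]:
--                 tmpstr = tmpstr.replace(sub[i], '', 1)
--                 break
--     return tmpstr
-- ===== SOURCE B (Python) =====
-- def DeleteCard(src, sub):
--     need = {}
--     for c in sub:
--         need[c] = need.get(c, 0) + 1
--     out = []
--     for c in src:
--         if need.get(c, 0) > 0:
--             need[c] = need[c] - 1
--         else: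
--             out.append(c)
--     return ''.join(out)
-- ===== Notes on version B (the rewrite author's own statement) =====
-- stated objective: faster
-- what changed: Replaced the per-sub-char scan of src plus repeated str.replace (each O(|src|)) by a Counter of sub built once and a single pass over src that skips the first count-many occurrences of each counted character.
import Mathlib
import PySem

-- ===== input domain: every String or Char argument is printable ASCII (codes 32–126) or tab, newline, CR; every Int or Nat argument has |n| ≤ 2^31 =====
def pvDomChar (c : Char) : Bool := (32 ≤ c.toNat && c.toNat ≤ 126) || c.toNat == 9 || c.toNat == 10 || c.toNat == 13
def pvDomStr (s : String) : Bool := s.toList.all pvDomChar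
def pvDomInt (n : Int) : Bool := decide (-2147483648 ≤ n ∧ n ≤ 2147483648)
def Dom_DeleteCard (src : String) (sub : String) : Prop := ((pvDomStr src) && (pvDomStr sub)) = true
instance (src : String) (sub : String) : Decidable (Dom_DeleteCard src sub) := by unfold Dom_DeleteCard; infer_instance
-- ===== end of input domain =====

-- B replaces A's per-sub-char scan of src plus repeated first-occurrence replace by a
-- counter of sub built once and a single skipping pass over src (objective: faster).


-- ===== PORT A =====
-- tmpstr.replace(sub[i], '', 1): single-character pattern, empty replacement, count 1 —
-- exactly "remove the first occurrence of that character", i.e. List.erase on the code points.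
def pvReplace1 (s : String) (c : Char) : String := String.ofList (s.toList.erase c)

-- inner loop: 'for j in range(0, len(src)): if sub[i] == src[j]: tmpstr = replace…; break'
def pvInnerA (src : List Char) (ci : Char) (tmp : String) : List Int → String
  | [] => tmp
  | j :: js =>
    match PySem.List.pyGet? src j with
    | none => tmp        -- unreachable: j ranges over 0 .. len(src)-1
    | some cj => if ci == cj then pvReplace1 tmp ci else pvInnerA src ci tmp js

def DeleteCard (src : String) (sub : String) : String :=
  (PySem.List.pyRange 0 (PySem.Str.len sub)).foldl
    (fun tmpstr i =>
      -- sub[i]: i is always in range here, so the default is never read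
      pvInnerA src.toList (PySem.List.pyGetD sub.toList i ' ') tmpstr
        (PySem.List.pyRange 0 (PySem.Str.len src)))
    src

-- ===== PORT B =====
def DeleteCard_alt (src : String) (sub : String) : String :=
  let need := sub.toList.foldl
    (fun d c => d.insert c (d.getD c 0 + 1)) (PySem.Dict.empty : PySem.Dict Char Int)
  let res := src.toList.foldl
    (fun (st : PySem.Dict Char Int × List Char) c =>
      if st.1.getD c 0 > 0 then (st.1.insert c (st.1.getD c 0 - 1), st.2)
      else (st.1, st.2 ++ [c]))
    (need, ([] : List Char))
  String.ofList res.2      -- ''.join(out)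

-- ===== PRECONDITION & SPEC =====
def Spec_DeleteCard (src : String) (sub : String) (out : String) : Prop := out = DeleteCard_alt src sub
instance (src : String) (sub : String) (out : String) : Decidable (Spec_DeleteCard src sub out) := by unfold Spec_DeleteCard; infer_instance

-- ===== CLAIM (what is proved, stated in full; the proofs are below) =====
def Claim_equal_DeleteCard : Prop := ∀ (src : String) (sub : String), Dom_DeleteCard src sub → Spec_DeleteCard src sub (DeleteCard src sub)

-- ===== LEMMAS AND PROOFS =====

-- common reference form: one pass over src skipping, per char c, the first (n c) occurrences
def pvSkip : List Char → (Char → Nat) → List Char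
  | [], _ => []
  | c :: t, n => if 0 < n c then pvSkip t (fun x => if x = c then n c - 1 else n x)
                 else c :: pvSkip t n

theorem pvSkip_erase (c : Char) :
    ∀ (src : List Char) (n : Char → Nat),
      pvSkip (src.erase c) n = pvSkip src (fun x => if x = c then n x + 1 else n x) := by
  intro src
  induction src with
  | nil => intro n; rfl
  | cons d t ih =>
    intro n
    by_cases hdc : d = c
    · subst hdc
      have he : (d :: t).erase d = t := by simp
      rw [he]
      simp only [pvSkip, Nat.zero_lt_succ, if_pos]
      congr 1
      funext x
      by_cases hx : x = d <;> simp [hx]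
    · have he : (d :: t).erase c = d :: t.erase c := by simp [hdc]
      rw [he]
      simp only [pvSkip, if_neg hdc]
      by_cases hd : 0 < n d
      · rw [if_pos hd, if_pos hd, ih]
        congr 1
        funext x
        by_cases hx : x = c <;> by_cases hxd : x = d <;> simp [hx, hxd, hdc] <;> simp_all
      · rw [if_neg hd, if_neg hd, ih]

theorem foldl_erase_eq_skip :
    ∀ (sub src : List Char),
      sub.foldl (fun t c => t.erase c) src = pvSkip src (fun c => List.count c sub) := by
  intro sub
  induction sub with
  | nil =>
    intro src
    simp only [List.foldl_nil]
    induction src with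
    | nil => rfl
    | cons c t ih =>
      rw [pvSkip]
      simp only [List.count_nil, Nat.lt_irrefl, if_false]
      exact congrArg (c :: ·) ih
  | cons c s ih =>
    intro src
    rw [List.foldl_cons, ih, pvSkip_erase]
    congr 1
    funext x
    by_cases hx : x = c <;> simp [hx, Ne.symm]

-- A-side: the inner loop removes the first occurrence of ci iff ci occurs in src
theorem inner_spec_aux (src : List Char) (ci : Char) :
    ∀ (m k : Nat) (tmp : String), m = src.length - k → k ≤ src.length →
      pvInnerA src ci tmp (PySem.List.pyRange (k : Int) (PySem.List.len src)) =
        if ci ∈ src.drop k then pvReplace1 tmp ci else tmp := by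
  intro m
  induction m with
  | zero =>
    intro k tmp hm hk
    have hk' : k = src.length := by omega
    subst hk'
    have hnil : PySem.List.pyRange (src.length : Int) (PySem.List.len src) = [] := by
      simp [PySem.List.pyRange, PySem.List.len]
    rw [hnil]
    simp [pvInnerA]
  | succ m ih =>
    intro k tmp hm hk
    have hklt : k < src.length := by omega
    have hcons : PySem.List.pyRange (k : Int) (PySem.List.len src) =
        (k : Int) :: PySem.List.pyRange ((k : Int) + 1) (PySem.List.len src) := by
      apply PySem.List.pyRange_one_cons
      simp [PySem.List.len]
      exact_mod_cast hklt
    rw [hcons]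
    have hget : PySem.List.pyGet? src (k : Int) = some src[k] := by
      rw [PySem.List.pyGet?_natCast]
      exact List.getElem?_eq_getElem hklt
    have hdrop : src.drop k = src[k] :: src.drop (k + 1) := (List.getElem_cons_drop hklt).symm
    simp only [pvInnerA, hget]
    by_cases hc : ci = src[k]
    · rw [if_pos (by exact beq_iff_eq.mpr hc)]
      rw [if_pos (by rw [hdrop]; exact hc ▸ List.mem_cons_self)]
    · rw [if_neg (by simp [hc])]
      have : ((k : Int) + 1) = ((k + 1 : Nat) : Int) := by push_cast; ring
      rw [this, ih (k+1) tmp (by omega) (by omega)]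
      conv_rhs => rw [hdrop]
      simp only [List.mem_cons, hc, false_or]

theorem foldA_mk (s0 : List Char) :
    ∀ (l : List Char) (s : String),
      l.foldl (fun tmp c => if c ∈ s0 then pvReplace1 tmp c else tmp) s =
        String.ofList (l.foldl (fun t c => if c ∈ s0 then t.erase c else t) s.toList) := by
  intro l
  induction l with
  | nil => intro s; exact String.ofList_toList.symm
  | cons c rest ih =>
    intro s
    simp only [List.foldl_cons]
    by_cases hc : c ∈ s0
    · rw [if_pos hc, if_pos hc, ih]
      simp [pvReplace1]
    · rw [if_neg hc, if_neg hc, ih]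

-- A tests membership in the ORIGINAL src; on states whose chars all come from src that
-- test is redundant (erasing an absent char is a no-op), so the fold is a plain erase fold
theorem foldA_drop_if (s0 : List Char) :
    ∀ (l : List Char) (t : List Char), (∀ x ∈ t, x ∈ s0) →
      l.foldl (fun t c => if c ∈ s0 then t.erase c else t) t =
        l.foldl (fun t c => t.erase c) t := by
  intro l
  induction l with
  | nil => intro t _; rfl
  | cons c rest ih =>
    intro t ht
    simp only [List.foldl_cons]
    by_cases hc : c ∈ s0
    · rw [if_pos hc]
      exact ih _ (fun x hx => ht x (List.mem_of_mem_erase hx))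
    · rw [if_neg hc]
      have : t.erase c = t := List.erase_of_not_mem (fun h => hc (ht c h))
      rw [this]
      exact ih t ht

theorem DeleteCard_eq_skip (src sub : String) :
    DeleteCard src sub = String.ofList (pvSkip src.toList (fun c => List.count c sub.toList)) := by
  unfold DeleteCard
  have h1 : PySem.Str.len sub = PySem.List.len sub.toList := rfl
  rw [h1, PySem.List.foldl_pyRange_pyGetD sub.toList ' '
    (fun tmpstr c => pvInnerA src.toList c tmpstr (PySem.List.pyRange 0 (PySem.Str.len src)))
    src (by norm_num)]
  simp only [Int.toNat_zero, List.drop_zero]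
  have h2 : (fun (tmpstr : String) (c : Char) =>
      pvInnerA src.toList c tmpstr (PySem.List.pyRange 0 (PySem.Str.len src))) =
      (fun tmpstr c => if c ∈ src.toList then pvReplace1 tmpstr c else tmpstr) := by
    funext tmpstr c
    have := inner_spec_aux src.toList c src.toList.length 0 tmpstr (by omega) (by omega)
    simpa using this
  rw [h2]
  rw [foldA_mk, foldA_drop_if _ _ _ (fun x hx => hx), foldl_erase_eq_skip]

-- B-side
def pvSkipD : List Char → PySem.Dict Char Int → List Char
  | [], _ => []
  | c :: t, d => if 0 < d.getD c 0 then pvSkipD t (d.insert c (d.getD c 0 - 1))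
                 else c :: pvSkipD t d

theorem foldB_snd :
    ∀ (src : List Char) (d : PySem.Dict Char Int) (out : List Char),
      (src.foldl
        (fun (st : PySem.Dict Char Int × List Char) c =>
          if st.1.getD c 0 > 0 then (st.1.insert c (st.1.getD c 0 - 1), st.2)
          else (st.1, st.2 ++ [c])) (d, out)).2 = out ++ pvSkipD src d := by
  intro src
  induction src with
  | nil => intro d out; simp [pvSkipD]
  | cons c t ih =>
    intro d out
    rw [List.foldl_cons, pvSkipD]
    by_cases hc : 0 < d.getD c 0
    · rw [if_pos hc, if_pos hc, ih]
    · rw [if_neg hc, if_neg hc, ih]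
      simp

theorem pvSkipD_eq_skip :
    ∀ (src : List Char) (d : PySem.Dict Char Int), (∀ c, 0 ≤ d.getD c 0) →
      pvSkipD src d = pvSkip src (fun c => (d.getD c 0).toNat) := by
  intro src
  induction src with
  | nil => intro d _; rfl
  | cons c t ih =>
    intro d hd
    rw [pvSkipD, pvSkip]
    by_cases hc : 0 < d.getD c 0
    · rw [if_pos hc, if_pos (by omega : 0 < (d.getD c 0).toNat)]
      rw [ih _ (fun x => by have := hd x; rw [PySem.Dict.getD_insert]; split <;> omega)]
      congr 1
      funext x
      rw [PySem.Dict.getD_insert]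
      by_cases hx : x = c
      · simp only [hx, if_pos]; omega
      · simp [hx]
    · rw [if_neg hc, if_neg (by omega : ¬ 0 < (d.getD c 0).toNat), ih d hd]

theorem DeleteCard_alt_eq_skip (src sub : String) :
    DeleteCard_alt src sub = String.ofList (pvSkip src.toList (fun c => List.count c sub.toList)) := by
  unfold DeleteCard_alt
  simp only [PySem.Dict.foldl_insert_getD_add_one_eq_counter]
  rw [foldB_snd, List.nil_append,
    pvSkipD_eq_skip _ _ (fun c => by rw [PySem.Dict.getD_counter]; positivity)]
  congr 1
  congr 1
  funext c
  rw [PySem.Dict.getD_counter]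
  exact Int.toNat_natCast _

-- ===== VERDICT (by name: the statement is the Claim_ definition above) =====
theorem DeleteCard_spec : Claim_equal_DeleteCard := by
  intro src sub _
  unfold Spec_DeleteCard
  rw [DeleteCard_eq_skip, DeleteCard_alt_eq_skip]
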